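-- pv_equiv track=rewrite | github.com/MargauxDuroeulx/Th-se | functions_lib.py | transform_neg_in_pos
-- ===== SOURCE A (Python) =====
-- def transform_neg_in_pos( tmp, components_nb ) :
-- # Input :
-- # Output :
--     # The function aims at converting a tie expressed like [-1,3] into another form [0,0,1] which only contains {0,1} and which describes each component. The list should contain as many elements as the system contains components.
--     x=[]
--     j=1
--     for i in range (0, components_nb) :
--         x.append(0)
--     for i in range (1, components_nb +1) :
--         if ( j <= len(tmp) )  :
--             if (tmp[j-1]== i) :
--                 x[i-1]=1
--                 j=j+1
--             elif ( tmp[j-1]== 0 ) :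
--                 #x[i-1]=0
--                 j=j+1
--             elif ( tmp[j-1]== -i ) :
--                 x[i-1]=1
--                 j=j+1
--     return x
-- ===== SOURCE B (Python) =====
-- def transform_neg_in_pos(tmp, components_nb):
--     x = [0] * components_nb
--     i = 1
--     for val in tmp:
--         while i <= components_nb and val != i and val != -i and val != 0:
--             i += 1
--         if i > components_nb:
--             break
--         if val == i or val == -i:
--             x[i - 1] = 1
--         i += 1
--     return x
-- ===== Notes on version B (the rewrite author's own statement) =====
-- stated objective: alternative
-- what changed: Inverts the loop structure: instead of iterating over component indices 1..components_nb with a pointer j into tmp, B iterates over the elements of tmp and advances a component cursor i with an inner while loop until the element matches i, -i or 0, marking x[i-1] on a signed match and breaking once the cursor passes components_nb.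
import Mathlib
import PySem

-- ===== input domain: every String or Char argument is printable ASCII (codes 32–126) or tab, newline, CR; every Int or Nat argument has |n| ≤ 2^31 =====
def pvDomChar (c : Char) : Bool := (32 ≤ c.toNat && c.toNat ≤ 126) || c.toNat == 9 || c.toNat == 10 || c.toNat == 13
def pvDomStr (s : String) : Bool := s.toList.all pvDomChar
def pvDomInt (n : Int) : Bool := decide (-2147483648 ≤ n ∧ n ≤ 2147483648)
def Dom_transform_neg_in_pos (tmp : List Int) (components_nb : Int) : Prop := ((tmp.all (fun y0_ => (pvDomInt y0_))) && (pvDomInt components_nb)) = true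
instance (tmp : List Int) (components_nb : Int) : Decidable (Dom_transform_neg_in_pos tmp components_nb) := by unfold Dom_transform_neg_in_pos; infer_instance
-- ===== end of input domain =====

-- B replaces A's index-driven loop (one iteration per component index, pointer j into tmp)
-- by a value-driven loop over the elements of tmp with a component cursor advanced by an
-- inner while; objective: alternative decomposition (same cost, inverted control flow).

-- ===== PORT A =====
-- body of A's loop 'for i in range(1, components_nb+1)' with mutable state (x, j);
-- x[i-1]=1 is List.set at (i-1).toNat, exact here since the loop gives 1 ≤ i.
def pvStepA (tmp : List Int) (s : List Int × Int) (i : Int) : List Int × Int :=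
  let x := s.1
  let j := s.2
  if j ≤ (tmp.length : Int) then
    match PySem.List.pyGet? tmp (j - 1) with
    | some v =>
      if v = i then (x.set (i-1).toNat 1, j+1)
      else if v = 0 then (x, j+1)
      else if v = -i then (x.set (i-1).toNat 1, j+1)
      else (x, j)
    | none => (x, j)  -- unreachable: the guard gives 1 ≤ j ≤ len(tmp)
  else (x, j)

def transform_neg_in_pos (tmp : List Int) (components_nb : Int) : List Int :=
  -- first loop: for i in range(0, components_nb): x.append(0)
  let x := (PySem.List.pyRange 0 components_nb 1).foldl (fun x _ => x ++ [(0:Int)]) []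
  -- second loop over range(1, components_nb+1) carrying (x, j), j starting at 1
  ((PySem.List.pyRange 1 (components_nb + 1) 1).foldl (pvStepA tmp) (x, 1)).1

-- ===== PORT B =====
-- inner 'while i <= components_nb and val != i and val != -i and val != 0: i += 1';
-- the Nat argument is fuel only (callers pass (cn+1-i).toNat, enough to exhaust the while).
def pvAdvanceB (cn v : Int) : Nat → Int → Int
  | 0, i => i
  | f+1, i => if i ≤ cn ∧ v ≠ i ∧ v ≠ -i ∧ v ≠ 0 then pvAdvanceB cn v f (i+1) else i

-- outer 'for val in tmp' with cursor i and accumulator x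
def pvLoopB (cn : Int) : List Int → Int → List Int → List Int
  | [], _, x => x
  | v :: rest, i, x =>
    let i' := pvAdvanceB cn v (cn + 1 - i).toNat i
    if cn < i' then x
    else pvLoopB cn rest (i'+1) (if v = i' ∨ v = -i' then x.set (i'-1).toNat 1 else x)

def transform_neg_in_pos_alt (tmp : List Int) (components_nb : Int) : List Int :=
  pvLoopB components_nb tmp 1 (List.replicate components_nb.toNat 0)

-- ===== PRECONDITION & SPEC =====
def Spec_transform_neg_in_pos (tmp : List Int) (components_nb : Int) (out : List Int) : Prop := out = transform_neg_in_pos_alt tmp components_nb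
instance (tmp : List Int) (components_nb : Int) (out : List Int) : Decidable (Spec_transform_neg_in_pos tmp components_nb out) := by unfold Spec_transform_neg_in_pos; infer_instance

-- ===== CLAIM (what is proved, stated in full; the proofs are below) =====
def Claim_equal_transform_neg_in_pos : Prop := ∀ (tmp : List Int) (components_nb : Int), Dom_transform_neg_in_pos tmp components_nb → Spec_transform_neg_in_pos tmp components_nb (transform_neg_in_pos tmp components_nb)

-- ===== LEMMAS AND PROOFS =====

lemma foldl_append_zero (l : List Int) (x : List Int) :
    l.foldl (fun x _ => x ++ [(0:Int)]) x = x ++ List.replicate l.length 0 := by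
  induction l generalizing x with
  | nil => simp
  | cons a t ih => simp [List.foldl, ih, List.replicate_succ]

lemma pvAdvanceB_stop (cn v i : Int) (f : Nat) (h : ¬ (i ≤ cn ∧ v ≠ i ∧ v ≠ -i ∧ v ≠ 0)) :
    pvAdvanceB cn v f i = i := by
  cases f <;> simp [pvAdvanceB, h]

lemma pvAdvanceB_step (cn v i : Int) (f : Nat) (h : i ≤ cn ∧ v ≠ i ∧ v ≠ -i ∧ v ≠ 0) :
    pvAdvanceB cn v (f+1) i = pvAdvanceB cn v f (i+1) := by
  simp [pvAdvanceB, h]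

lemma pvLoopB_of_gt (cn : Int) (l : List Int) (i : Int) (x : List Int) (h : cn < i) :
    pvLoopB cn l i x = x := by
  cases l with
  | nil => rfl
  | cons v rest =>
    have hs : pvAdvanceB cn v (cn + 1 - i).toNat i = i := pvAdvanceB_stop cn v i _ (by omega)
    simp [pvLoopB, hs, h]

lemma pvLoopB_shift (cn : Int) (v : Int) (rest : List Int) (i : Int) (x : List Int)
    (h : i ≤ cn ∧ v ≠ i ∧ v ≠ -i ∧ v ≠ 0) :
    pvLoopB cn (v :: rest) i x = pvLoopB cn (v :: rest) (i+1) x := by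
  have hf : (cn + 1 - i).toNat = (cn + 1 - (i+1)).toNat + 1 := by omega
  simp only [pvLoopB, hf, pvAdvanceB_step cn v i _ h]

lemma pvKey (tmp : List Int) (cn : Int) :
    ∀ (n : ℕ) (i j : Int) (x : List Int), n = (cn + 1 - i).toNat → 1 ≤ i → 1 ≤ j →
      ((PySem.List.pyRange i (cn+1) 1).foldl (pvStepA tmp) (x, j)).1 =
        pvLoopB cn (tmp.drop (j-1).toNat) i x := by
  intro n
  induction n with
  | zero =>
    intro i j x hn hi hj
    rw [PySem.List.pyRange_one_eq_nil (by omega), pvLoopB_of_gt cn _ i x (by omega)]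
    rfl
  | succ n ih =>
    intro i j x hn hi hj
    have hle : i ≤ cn := by omega
    rw [PySem.List.pyRange_one_cons (by omega), List.foldl_cons]
    show ((PySem.List.pyRange (i+1) (cn+1) 1).foldl (pvStepA tmp) (pvStepA tmp (x, j) i)).1 = _
    cases hdrop : tmp.drop (j-1).toNat with
    | nil =>
      have hlen : tmp.length ≤ (j-1).toNat := by
        by_contra hc
        push Not at hc
        exact absurd hdrop (by simp [List.drop_eq_nil_iff]; omega)
      have hjg : ¬ j ≤ (tmp.length : Int) := by omega
      rw [show pvStepA tmp (x, j) i = (x, j) by simp [pvStepA, hjg]]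
      rw [ih (i+1) j x (by omega) (by omega) hj, hdrop]
      simp [pvLoopB]
    | cons v rest =>
      have hlt : (j-1).toNat < tmp.length := by
        by_contra hc
        push Not at hc
        rw [List.drop_eq_nil_of_le hc] at hdrop
        exact absurd hdrop (by simp)
      have hjle : j ≤ (tmp.length : Int) := by omega
      have hget : PySem.List.pyGet? tmp (j-1) = some v := by
        rw [PySem.List.pyGet?_of_nonneg]
        · have := congrArg (fun l => l[0]?) hdrop
          simpa [List.getElem?_drop] using this
        · omega
      have hdrop' : tmp.drop ((j+1)-1).toNat = rest := by
        have he : ((j+1)-1).toNat = (j-1).toNat + 1 := by omega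
        rw [he, ← List.drop_drop, hdrop]
        simp
      by_cases h1 : v = i
      · subst h1
        have hs : pvAdvanceB cn v (cn + 1 - v).toNat v = v := pvAdvanceB_stop _ _ _ _ (by simp)
        rw [show pvStepA tmp (x, j) v = (x.set (v-1).toNat 1, j+1) by
          simp [pvStepA, hjle, hget]]
        rw [ih (v+1) (j+1) _ (by omega) (by omega) (by omega), hdrop']
        simp only [pvLoopB, hs]
        simp [show ¬ cn < v by omega]
      · by_cases h0 : v = 0
        · subst h0
          have hs : pvAdvanceB cn 0 (cn + 1 - i).toNat i = i := pvAdvanceB_stop _ _ _ _ (by simp)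
          rw [show pvStepA tmp (x, j) i = (x, j+1) by simp [pvStepA, hjle, hget, h1]]
          rw [ih (i+1) (j+1) _ (by omega) (by omega) (by omega), hdrop']
          simp only [pvLoopB, hs]
          rw [if_neg (show ¬ cn < i by omega),
            if_neg (show ¬ ((0:Int) = i ∨ (0:Int) = -i) by omega)]
        · by_cases hm : v = -i
          · subst hm
            have hs : pvAdvanceB cn (-i) (cn + 1 - i).toNat i = i := pvAdvanceB_stop _ _ _ _ (by simp)
            rw [show pvStepA tmp (x, j) i = (x.set (i-1).toNat 1, j+1) by
              simp [pvStepA, hjle, hget, h1, h0]]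
            rw [ih (i+1) (j+1) _ (by omega) (by omega) (by omega), hdrop']
            simp only [pvLoopB, hs]
            simp [show ¬ cn < i by omega]
          · rw [show pvStepA tmp (x, j) i = (x, j) by simp [pvStepA, hjle, hget, h1, h0, hm]]
            rw [ih (i+1) j x (by omega) (by omega) hj, hdrop]
            exact (pvLoopB_shift cn v rest i x ⟨hle, h1, hm, h0⟩).symm

lemma pvInit (cn : Int) :
    (PySem.List.pyRange 0 cn 1).foldl (fun x _ => x ++ [(0:Int)]) [] =
      List.replicate cn.toNat 0 := by
  rw [foldl_append_zero]
  simp [PySem.List.length_pyRange_one]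

-- ===== VERDICT (by name: the statement is the Claim_ definition above) =====
theorem transform_neg_in_pos_spec : Claim_equal_transform_neg_in_pos := by
  intro tmp cn _
  show transform_neg_in_pos tmp cn = transform_neg_in_pos_alt tmp cn
  unfold transform_neg_in_pos transform_neg_in_pos_alt
  rw [pvInit]
  have := pvKey tmp cn (cn + 1 - 1).toNat 1 1 (List.replicate cn.toNat 0) rfl (by omega) (by omega)
  simpa using this
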